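-- pv_equiv track=rewrite | github.com/henri-branken-matogen/henri_libs | custom_udfs/my_udfs.py | derive_first_mob
-- ===== SOURCE A (Python) =====
-- def derive_first_mob(arr):
--     """
--     Given an input Months-On-Book String Profile, that is mostly empty, this function determines the right-most,
--     non-null value.  If such a value exists, then derive the Month-01 Months-On-Book value, and return that value.
--     If such a value does not exist, then the Month-01 Months-On-Book value cannot be determined,
--     and a Null is returned as a result.
--     """
--     arr_1 = arr[:-1]
--     ls_0 = arr_1.split("|")
--     ls_1 = [int(chunk) if "." not in chunk else None for chunk in ls_0]
--     ls_2 = ls_1[::-1]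
--     idx = next((i for i, val in enumerate(ls_2) if val), -999)
--     if idx >= 0:
--         mob_mth_1 = ls_2[idx] + 60 - idx - 1
--     else:
--         mob_mth_1 = None
--     return mob_mth_1
-- ===== SOURCE B (Python) =====
-- def derive_first_mob(arr):
--     """Backward character scan: walk the raw string from the end, assembling one
--     chunk at a time (no split, no list), and return as soon as the rightmost
--     truthy chunk is found."""
--     k = 0
--     chunk = ""
--     dotted = False
--     for c in reversed(arr[:-1]):
--         if c == "|":
--             if not dotted:
--                 v = int(chunk)
--                 if v:
--                     return v + 60 - k - 1
--             k += 1
--             chunk = ""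
--             dotted = False
--         else:
--             chunk = c + chunk
--             if c == ".":
--                 dotted = True
--     if not dotted:
--         v = int(chunk)
--         if v:
--             return v + 60 - k - 1
--     return None
-- ===== Notes on version B (the rewrite author's own statement) =====
-- stated objective: alternative
-- what changed: Replaces A's split-into-chunks / parse-all / reverse / sentinel-index pipeline with a backward character-level scan of the raw string that assembles one chunk at a time, tracks a '.'-seen flag instead of substring search, and returns early at the rightmost truthy chunk without ever building the chunk list.
import Mathlib
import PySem

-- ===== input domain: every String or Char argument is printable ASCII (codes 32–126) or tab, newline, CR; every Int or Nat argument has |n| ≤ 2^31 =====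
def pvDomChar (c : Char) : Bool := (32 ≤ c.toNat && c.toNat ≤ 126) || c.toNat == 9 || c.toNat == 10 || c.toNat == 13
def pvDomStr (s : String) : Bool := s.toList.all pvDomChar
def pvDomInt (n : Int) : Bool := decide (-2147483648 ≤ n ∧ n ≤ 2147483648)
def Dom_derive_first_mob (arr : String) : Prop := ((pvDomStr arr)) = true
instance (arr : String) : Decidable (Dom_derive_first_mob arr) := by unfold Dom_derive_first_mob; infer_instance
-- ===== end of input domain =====

-- B replaces A's split/parse-all/reverse/sentinel-index pipeline with a backward character-level
-- scan assembling one chunk at a time with early exit at the rightmost truthy chunk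
-- (objective: alternative; same asymptotic cost).


-- Python truthiness of an Optional[int]: None and 0 are falsy (A's `if val`)
def pvTruthy (v : Option Int) : Bool :=
  match v with
  | some x => x != 0
  | none => false

-- ===== PORT A =====
def derive_first_mob (arr : String) : Option Int :=
  let arr_1 := PySem.Chars.slice arr.toList none (some (-1))
  let ls_0 := PySem.Chars.splitOn arr_1 ['|']
  let ls_1 : List (Option Int) := ls_0.map (fun chunk =>
    if PySem.Chars.isIn ['.'] chunk then none else PySem.Int.ofChars? chunk)
  let ls_2 := ls_1.reverse
  let idx : Int := (((PySem.List.enumerate ls_2 0).find? (fun p => pvTruthy p.2)).map (·.1)).getD (-999)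
  if 0 ≤ idx then
    (PySem.List.pyGet? ls_2 idx).bind (fun v => v.map (fun x => x + 60 - idx - 1))
  else
    none

-- ===== PORT B =====
-- B's loop over reversed(arr[:-1]) with state (k, chunk, dotted) and early return;
-- on `int(chunk)` failing (a ValueError in Python, excluded by Pre_) the port continues with none.
def pvGoB : List Char → Int → List Char → Bool → Option Int
  | [], k, chunk, dotted =>
    if dotted then none
    else match PySem.Int.ofChars? chunk with
      | some v => if v ≠ 0 then some (v + 60 - k - 1) else none
      | none => none
  | c :: rest, k, chunk, dotted =>
    if c = '|' then
      if dotted then pvGoB rest (k + 1) [] false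
      else match PySem.Int.ofChars? chunk with
        | some v => if v ≠ 0 then some (v + 60 - k - 1) else pvGoB rest (k + 1) [] false
        | none => pvGoB rest (k + 1) [] false
    else pvGoB rest k (c :: chunk) (dotted || decide (c = '.'))

def derive_first_mob_alt (arr : String) : Option Int :=
  pvGoB (PySem.Chars.slice arr.toList none (some (-1))).reverse 0 [] false

-- ===== PRECONDITION & SPEC =====
-- Python A raises ValueError exactly when some '|'-chunk of arr[:-1] has no '.' and is not an int literal.
def Pre_derive_first_mob (arr : String) : Prop :=
  ((PySem.Chars.splitOn (arr.toList.dropLast) ['|']).all (fun c =>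
    PySem.Chars.isIn ['.'] c || (PySem.Int.ofChars? c).isSome)) = true
instance (arr : String) : Decidable (Pre_derive_first_mob arr) := by unfold Pre_derive_first_mob; infer_instance

def pvWitness_derive_first_mob : String := "12|.|.|"

def Spec_derive_first_mob (arr : String) (out : Option Int) : Prop := out = derive_first_mob_alt arr
instance (arr : String) (out : Option Int) : Decidable (Spec_derive_first_mob arr out) := by unfold Spec_derive_first_mob; infer_instance

-- ===== CLAIM (what is proved, stated in full; the proofs are below) =====
def Claim_equal_derive_first_mob : Prop := ∀ (arr : String), Dom_derive_first_mob arr → Pre_derive_first_mob arr → Spec_derive_first_mob arr (derive_first_mob arr)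

-- ===== LEMMAS AND PROOFS =====

-- value and index of the FIRST truthy element
def pvFirstTruthy : List (Option Int) → Option (Int × Nat)
  | [] => none
  | v :: rest =>
    match v with
    | some x => if x ≠ 0 then some (x, 0) else (pvFirstTruthy rest).map (fun p => (p.1, p.2 + 1))
    | none => (pvFirstTruthy rest).map (fun p => (p.1, p.2 + 1))

theorem pvFind_eq_firstTruthy (R : List (Option Int)) (s : Int) :
    (PySem.List.enumerate R s).find? (fun p => pvTruthy p.2)
      = (pvFirstTruthy R).map (fun p => (s + (p.2 : Int), some p.1)) := by
  induction R generalizing s with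
  | nil => simp [pvFirstTruthy, PySem.List.enumerate_nil]
  | cons v rest ih =>
    rw [PySem.List.enumerate_cons, List.find?_cons, ih (s + 1)]
    cases v with
    | none =>
      simp only [pvFirstTruthy, pvTruthy, Option.map_map]
      cases pvFirstTruthy rest with
      | none => simp
      | some p =>
        simp only [Option.map_some, Function.comp, Option.some.injEq, Prod.mk.injEq]
        exact ⟨by push_cast; ring, trivial⟩
    | some x =>
      by_cases hx : x = 0
      · subst hx
        simp only [pvFirstTruthy, pvTruthy, bne_self_eq_false, Option.map_map,
          if_neg (by simp : ¬ (0 : Int) ≠ 0)]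
        cases pvFirstTruthy rest with
        | none => simp
        | some p =>
          simp only [Option.map_some, Function.comp, Option.some.injEq, Prod.mk.injEq]
          exact ⟨by push_cast; ring, trivial⟩
      · have hb : (x != 0) = true := by simp [bne, hx]
        simp only [pvTruthy, hb]
        simp [pvFirstTruthy, hx]

theorem pvFirstTruthy_get {R : List (Option Int)} {w : Int} {k : Nat}
    (h : pvFirstTruthy R = some (w, k)) : R[k]? = some (some w) := by
  induction R generalizing k with
  | nil => simp [pvFirstTruthy] at h
  | cons v rest ih =>
    cases v with
    | none =>
      simp only [pvFirstTruthy] at h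
      cases hr : pvFirstTruthy rest with
      | none => rw [hr] at h; simp at h
      | some p =>
        obtain ⟨pw, pk⟩ := p
        rw [hr] at h
        simp only [Option.map_some, Option.some.injEq, Prod.mk.injEq] at h
        obtain ⟨h1, h2⟩ := h
        subst h1
        cases k with
        | zero => omega
        | succ k' =>
          have hk' : pk = k' := by omega
          subst hk'
          simpa using ih hr
    | some x =>
      by_cases hx : x = 0
      · subst hx
        simp only [pvFirstTruthy, if_neg (by simp : ¬ (0 : Int) ≠ 0)] at h
        cases hr : pvFirstTruthy rest with
        | none => rw [hr] at h; simp at h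
        | some p =>
          obtain ⟨pw, pk⟩ := p
          rw [hr] at h
          simp only [Option.map_some, Option.some.injEq, Prod.mk.injEq] at h
          obtain ⟨h1, h2⟩ := h
          subst h1
          cases k with
          | zero => omega
          | succ k' =>
            have hk' : pk = k' := by omega
            simpa [hk'] using ih hr
      · simp only [pvFirstTruthy, if_pos hx, Option.some.injEq, Prod.mk.injEq] at h
        obtain ⟨h1, h2⟩ := h
        subst h1; subst h2
        simp

-- a simple reference recursion computing s.split("|") (single-char separator)
def pvSp : List Char → List (List Char)
  | [] => [[]]
  | c :: rest => if c = '|' then [] :: pvSp rest else (pvSp rest).modifyHead (fun h => c :: h)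

theorem pvSp_ne_nil (s : List Char) : pvSp s ≠ [] := by
  cases s with
  | nil => simp [pvSp]
  | cons c rest =>
    simp only [pvSp]
    split_ifs
    · simp
    · cases h : pvSp rest with
      | nil => exact absurd h (pvSp_ne_nil rest)
      | cons a t => simp [List.modifyHead]

theorem pvGo_spec (fuel : Nat) : ∀ (l : List Char), l.length < fuel → ∀ (cur : List Char) (acc : List (List Char)),
    PySem.Chars.splitOn.go ['|'] fuel l cur acc
      = acc.reverse ++ (pvSp l).modifyHead (fun h => cur.reverse ++ h) := by
  induction fuel with
  | zero => intro l hl; omega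
  | succ f ih =>
    intro l hl cur acc
    cases l with
    | nil =>
      simp [PySem.Chars.splitOn.go, pvSp, List.modifyHead]
    | cons c rest =>
      by_cases hc : c = '|'
      · subst hc
        have hpre : List.isPrefixOf ['|'] ('|' :: rest) = true := by
          simp [List.isPrefixOf]
        rw [PySem.Chars.splitOn.go]
        simp only [hpre, if_true, List.length_cons, List.length_nil, List.drop_succ_cons,
          List.drop_zero]
        rw [ih rest (by simp at hl; omega) [] (cur.reverse :: acc)]
        simp [pvSp, List.modifyHead]
        cases h : pvSp rest with
        | nil => exact absurd h (pvSp_ne_nil rest)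
        | cons a t => simp
      · have hpre : List.isPrefixOf ['|'] (c :: rest) = false := by
          simp [List.isPrefixOf]
          intro h; exact hc h.symm
        rw [PySem.Chars.splitOn.go]
        simp only [hpre, if_false, Bool.false_eq_true]
        rw [ih rest (by simp at hl; omega) (c :: cur) acc]
        simp only [pvSp, if_neg hc]
        cases h : pvSp rest with
        | nil => exact absurd h (pvSp_ne_nil rest)
        | cons a t => simp [List.modifyHead]

theorem pvSplitOn_eq_pvSp (s : List Char) : PySem.Chars.splitOn s ['|'] = pvSp s := by
  rw [PySem.Chars.splitOn, pvGo_spec (s.length + 1) s (by omega) [] []]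
  cases h : pvSp s with
  | nil => exact absurd h (pvSp_ne_nil s)
  | cons a t => simp [List.modifyHead]

theorem pvSp_no_sep {s : List Char} (h : '|' ∉ s) : pvSp s = [s] := by
  induction s with
  | nil => simp [pvSp]
  | cons c rest ih =>
    have hc : c ≠ '|' := fun hh => h (by simp [hh])
    have hr : '|' ∉ rest := fun hh => h (by simp [hh])
    simp [pvSp, hc, ih hr, List.modifyHead]

theorem pvSp_append (a b : List Char) : pvSp (a ++ '|' :: b) = pvSp a ++ pvSp b := by
  induction a with
  | nil => simp [pvSp]
  | cons c a' ih =>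
    by_cases hc : c = '|'
    · subst hc; simp [pvSp, ih]
    · simp only [List.cons_append, pvSp, if_neg hc, ih]
      cases h : pvSp a' with
      | nil => exact absurd h (pvSp_ne_nil a')
      | cons x t => simp [List.modifyHead]

theorem pvSplit_last {s : List Char} (h : '|' ∈ s) :
    ∃ a b, s = a ++ '|' :: b ∧ '|' ∉ b := by
  induction s with
  | nil => simp at h
  | cons c rest ih =>
    by_cases hr : '|' ∈ rest
    · obtain ⟨a, b, heq, hb⟩ := ih hr
      exact ⟨c :: a, b, by simp [heq], hb⟩
    · have hc : c = '|' := by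
        rcases List.mem_cons.mp h with h1 | h1
        · exact h1.symm
        · exact absurd h1 hr
      exact ⟨[], rest, by simp [hc], hr⟩

theorem pvGoB_skip (rev0 : List Char) (h : '|' ∉ rev0) :
    ∀ (l : List Char) (k : Int) (chunk : List Char) (d : Bool),
      pvGoB (rev0 ++ l) k chunk d
        = pvGoB l k (rev0.reverse ++ chunk) (d || decide ('.' ∈ rev0)) := by
  induction rev0 with
  | nil => intro l k chunk d; simp
  | cons c r0 ih =>
    intro l k chunk d
    have hc : c ≠ '|' := fun hh => h (by simp [hh])
    have hr : '|' ∉ r0 := fun hh => h (by simp [hh])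
    rw [List.cons_append, pvGoB]
    simp only [if_neg hc]
    rw [ih hr l k (c :: chunk) (d || decide (c = '.'))]
    congr 1
    · simp
    · by_cases h1 : c = '.'
      · subst h1
        by_cases h2 : '.' ∈ r0 <;> simp [h2]
      · have h1' : ¬ '.' = c := fun hh => h1 hh.symm
        by_cases h2 : '.' ∈ r0 <;> simp [h1, h1', h2]

theorem pvIsIn_dot (c : List Char) : PySem.Chars.isIn ['.'] c = decide ('.' ∈ c) := by
  by_cases h : '.' ∈ c
  · obtain ⟨s, t, rfl⟩ := List.append_of_mem h
    have : PySem.Chars.isIn ['.'] (s ++ '.' :: t) = true :=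
      (PySem.Chars.isIn_iff_infix _ _).mpr ⟨s, t, by simp⟩
    simp [this, h]
  · have : PySem.Chars.isIn ['.'] c = false := by
      apply (PySem.Chars.isIn_eq_false_iff _ _).mpr
      intro hinf
      exact h (hinf.subset (by simp))
    simp [this, h]

def pvRes (L : List (Option Int)) (k : Int) : Option Int :=
  match pvFirstTruthy L with
  | none => none
  | some p => some (p.1 + 60 - (k + (p.2 : Int)) - 1)

theorem pvRes_cons (x : Option Int) (L : List (Option Int)) (k : Int) :
    pvRes (x :: L) k
      = match x with
        | some v => if v ≠ 0 then some (v + 60 - k - 1) else pvRes L (k + 1)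
        | none => pvRes L (k + 1) := by
  cases x with
  | none =>
    simp only [pvRes, pvFirstTruthy]
    cases h : pvFirstTruthy L with
    | none => simp
    | some p => simp; ring
  | some v =>
    by_cases hv : v = 0
    · subst hv
      simp only [pvRes, pvFirstTruthy, if_neg (by simp : ¬ (0 : Int) ≠ 0)]
      cases h : pvFirstTruthy L with
      | none => simp
      | some p => simp; ring
    · simp [pvRes, pvFirstTruthy, hv]

theorem pvGoB_nosep {s : List Char} (h : '|' ∉ s) (k : Int) :
    pvGoB s.reverse k [] false
      = pvRes ((pvSp s).map (fun chunk =>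
          if PySem.Chars.isIn ['.'] chunk then none else PySem.Int.ofChars? chunk)).reverse k := by
  have hrev : '|' ∉ s.reverse := by simpa using h
  have h1 := pvGoB_skip s.reverse hrev [] k [] false
  have hdec : decide ('.' ∈ s.reverse) = decide ('.' ∈ s) := by simp
  simp only [List.append_nil, List.reverse_reverse, Bool.false_or, hdec] at h1
  rw [h1, pvSp_no_sep h]
  simp only [List.map_cons, List.map_nil, List.reverse_singleton]
  rw [pvRes_cons, pvIsIn_dot]
  by_cases hd : '.' ∈ s
  · simp [pvGoB, hd, pvRes, pvFirstTruthy]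
  · cases ho : PySem.Int.ofChars? s with
    | none => simp [pvGoB, hd, ho, pvRes, pvFirstTruthy]
    | some v =>
      by_cases hv : v = 0
      · simp [pvGoB, hd, ho, hv, pvRes, pvFirstTruthy]
      · simp [pvGoB, hd, ho, hv]

theorem pvGoB_main : ∀ (n : Nat) (s : List Char), s.length ≤ n → ∀ (k : Int),
    pvGoB s.reverse k [] false
      = pvRes ((pvSp s).map (fun chunk =>
          if PySem.Chars.isIn ['.'] chunk then none else PySem.Int.ofChars? chunk)).reverse k := by
  intro n
  induction n with
  | zero =>
    intro s hs k
    have : s = [] := List.eq_nil_of_length_eq_zero (by omega)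
    subst this
    exact pvGoB_nosep (by simp) k
  | succ n ih =>
    intro s hs k
    by_cases hmem : '|' ∈ s
    · obtain ⟨a, b, rfl, hb⟩ := pvSplit_last hmem
      have hrev : (a ++ '|' :: b).reverse = b.reverse ++ '|' :: a.reverse := by
        simp
      rw [hrev]
      have hbrev : '|' ∉ b.reverse := by simpa using hb
      rw [pvGoB_skip b.reverse hbrev ('|' :: a.reverse) k [] false]
      have hdec2 : decide ('.' ∈ b.reverse) = decide ('.' ∈ b) := by simp
      simp only [List.append_nil, List.reverse_reverse, Bool.false_or, hdec2]
      have ha : a.length ≤ n := by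
        simp only [List.length_append, List.length_cons] at hs
        omega
      have hIH := ih a ha (k + 1)
      rw [pvSp_append a b, pvSp_no_sep hb]
      simp only [List.map_append, List.map_cons, List.map_nil, List.reverse_append,
        List.reverse_singleton, List.singleton_append]
      rw [pvRes_cons, pvIsIn_dot]
      by_cases hd : '.' ∈ b
      · simpa [pvGoB, hd] using hIH
      · cases ho : PySem.Int.ofChars? b with
        | none => simpa [pvGoB, hd, ho] using hIH
        | some v =>
          by_cases hv : v = 0
          · simpa [pvGoB, hd, ho, hv] using hIH
          · simp [pvGoB, hd, ho, hv]
    · exact pvGoB_nosep hmem k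

-- ===== VERDICT (by name: the statement is the Claim_ definition above) =====
theorem derive_first_mob_spec : Claim_equal_derive_first_mob := by
  intro arr _ _
  unfold Spec_derive_first_mob derive_first_mob derive_first_mob_alt
  set s' : List Char := PySem.Chars.slice arr.toList none (some (-1)) with hs'
  set L : List (Option Int) :=
    (PySem.Chars.splitOn s' ['|']).map
      (fun chunk => if PySem.Chars.isIn ['.'] chunk then none else PySem.Int.ofChars? chunk)
    with hL
  have hB : pvGoB s'.reverse 0 [] false = pvRes L.reverse 0 := by
    rw [pvGoB_main s'.length s' (le_refl _) 0, hL, pvSplitOn_eq_pvSp]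
  rw [hB]
  simp only [pvFind_eq_firstTruthy]
  cases hF : pvFirstTruthy L.reverse with
  | none => simp [pvRes, hF]
  | some p =>
    obtain ⟨w, j⟩ := p
    have hget := pvFirstTruthy_get hF
    simp only [Option.map_some, Option.getD_some, zero_add]
    rw [if_pos (by positivity : (0 : Int) ≤ (j : Int)),
      PySem.List.pyGet?_natCast, hget]
    simp only [Option.bind_some, Option.map_some, pvRes, hF]
    congr 1
    ring
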